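-- pv_equiv track=rewrite | github.com/Jacob-Thomas-I21/Enterprise-Event-Analytics | backend/workers/chat_analysis_worker.py | categorize_toxicity
-- ===== SOURCE A (Python) =====
-- from typing import Dict, Any, List, Optional
--
-- def categorize_toxicity(toxic_words: List[str]) -> List[str]:
--     """Categorize types of toxicity"""
--     categories = []
--
--     hate_words = {'hate', 'toxic', 'stupid', 'idiot', 'moron', 'dumb'}
--     spam_words = {'spam', 'scam', 'fraud', 'fake', 'bot', 'shill'}
--     threat_words = {'kill', 'die', 'death', 'suicide', 'harm'}
--
--     if any(word in hate_words for word in toxic_words):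
--         categories.append("hate_speech")
--
--     if any(word in spam_words for word in toxic_words):
--         categories.append("spam")
--
--     if any(word in threat_words for word in toxic_words):
--         categories.append("threats")
--
--     return categories
-- ===== SOURCE B (Python) =====
-- def categorize_toxicity(toxic_words):
--     """Categorize types of toxicity"""
--     word_category = {
--         'hate': 'hate_speech', 'toxic': 'hate_speech', 'stupid': 'hate_speech',
--         'idiot': 'hate_speech', 'moron': 'hate_speech', 'dumb': 'hate_speech',
--         'spam': 'spam', 'scam': 'spam', 'fraud': 'spam', 'fake': 'spam',
--         'bot': 'spam', 'shill': 'spam',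
--         'kill': 'threats', 'die': 'threats', 'death': 'threats',
--         'suicide': 'threats', 'harm': 'threats',
--     }
--     found = set()
--     for word in toxic_words:
--         category = word_category.get(word)
--         if category is not None:
--             found.add(category)
--     return [label for label in ('hate_speech', 'spam', 'threats') if label in found]
-- ===== Notes on version B (the rewrite author's own statement) =====
-- stated objective: alternative
-- what changed: Replaces three independent any() scans over toxic_words (one per category set) with a single pass that indexes each word in a word->category dict into one 'found' set, then emits the fixed category order; three scans collapse to one traversal plus an ordered emit.
import Mathlib
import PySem

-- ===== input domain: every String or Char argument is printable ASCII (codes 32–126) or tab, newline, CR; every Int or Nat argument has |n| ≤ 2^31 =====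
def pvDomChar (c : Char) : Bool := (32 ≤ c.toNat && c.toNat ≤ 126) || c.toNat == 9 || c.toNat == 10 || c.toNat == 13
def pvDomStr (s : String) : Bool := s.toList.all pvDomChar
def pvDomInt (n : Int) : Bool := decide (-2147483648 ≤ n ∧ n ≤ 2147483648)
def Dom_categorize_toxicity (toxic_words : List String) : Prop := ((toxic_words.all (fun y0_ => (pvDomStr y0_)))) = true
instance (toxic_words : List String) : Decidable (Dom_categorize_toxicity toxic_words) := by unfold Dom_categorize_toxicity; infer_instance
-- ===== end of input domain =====

-- B replaces A's three independent any() scans with one pass through a word->category index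
-- collecting a 'found' set, then an ordered emit (alternative decomposition, same behaviour).

set_option maxRecDepth 4000


-- ===== PORT A =====
def categorize_toxicity (toxic_words : List String) : List String :=
  let categories : List String := []
  let hate_words : PySem.Set String := PySem.Set.ofList ["hate", "toxic", "stupid", "idiot", "moron", "dumb"]
  let spam_words : PySem.Set String := PySem.Set.ofList ["spam", "scam", "fraud", "fake", "bot", "shill"]
  let threat_words : PySem.Set String := PySem.Set.ofList ["kill", "die", "death", "suicide", "harm"]
  let categories := if toxic_words.any (fun word => PySem.Set.contains hate_words word) then categories ++ ["hate_speech"] else categories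
  let categories := if toxic_words.any (fun word => PySem.Set.contains spam_words word) then categories ++ ["spam"] else categories
  let categories := if toxic_words.any (fun word => PySem.Set.contains threat_words word) then categories ++ ["threats"] else categories
  categories

-- ===== PORT B =====
def word_category : PySem.Dict String String := PySem.Dict.ofList
  [("hate", "hate_speech"), ("toxic", "hate_speech"), ("stupid", "hate_speech"),
   ("idiot", "hate_speech"), ("moron", "hate_speech"), ("dumb", "hate_speech"),
   ("spam", "spam"), ("scam", "spam"), ("fraud", "spam"), ("fake", "spam"),
   ("bot", "spam"), ("shill", "spam"),
   ("kill", "threats"), ("die", "threats"), ("death", "threats"),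
   ("suicide", "threats"), ("harm", "threats")]

def categorize_toxicity_alt (toxic_words : List String) : List String :=
  let found : PySem.Set String :=
    toxic_words.foldl (fun s word =>
      match PySem.Dict.get? word_category word with
      | some category => PySem.Set.add s category
      | none => s) PySem.Set.empty
  (["hate_speech", "spam", "threats"] : List String).filter (fun label => PySem.Set.contains found label)

-- ===== PRECONDITION & SPEC =====
def Spec_categorize_toxicity (toxic_words : List String) (out : List String) : Prop := out = categorize_toxicity_alt toxic_words
instance (toxic_words : List String) (out : List String) : Decidable (Spec_categorize_toxicity toxic_words out) := by unfold Spec_categorize_toxicity; infer_instance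

-- ===== CLAIM (what is proved, stated in full; the proofs are below) =====
def Claim_equal_categorize_toxicity : Prop := ∀ (toxic_words : List String), Dom_categorize_toxicity toxic_words → Spec_categorize_toxicity toxic_words (categorize_toxicity toxic_words)

-- ===== LEMMAS AND PROOFS =====

-- membership of a label in B's folded 'found' set
theorem mem_found (ws : List String) (s : PySem.Set String) (label : String) :
    (label ∈ ws.foldl (fun s word =>
        match PySem.Dict.get? word_category word with
        | some category => PySem.Set.add s category
        | none => s) s)
    ↔ label ∈ s ∨ ∃ w ∈ ws, PySem.Dict.get? word_category w = some label := by
  induction ws generalizing s with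
  | nil => simp
  | cons w ws ih =>
    simp only [List.foldl_cons]
    cases h : PySem.Dict.get? word_category w with
    | none =>
      rw [ih]
      simp only [List.exists_mem_cons_iff, h]
      tauto
    | some c =>
      rw [ih]
      simp only [PySem.Set.mem_add, List.exists_mem_cons_iff, h, Option.some.injEq]
      constructor
      · rintro ((hs | rfl) | hex) <;> tauto
      · rintro (hs | (rfl | hex)) <;> tauto

-- B's folded set queried at a label agrees with an any-scan over that label's word list
theorem found_eq (ws : List String) (label : String) (wordlist : List String)
    (hiff : ∀ w : String, PySem.Dict.get? word_category w = some label ↔ w ∈ wordlist) :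
    PySem.Set.contains
      (ws.foldl (fun s word =>
        match PySem.Dict.get? word_category word with
        | some category => PySem.Set.add s category
        | none => s) PySem.Set.empty) label
    = ws.any (fun w => PySem.Set.contains (PySem.Set.ofList wordlist) w) := by
  rw [Bool.eq_iff_iff]
  simp only [PySem.Set.contains_iff, mem_found, List.any_eq_true, hiff,
    PySem.Set.mem_ofList, PySem.Set.empty, List.not_mem_nil, false_or]

-- the word->category index agrees pointwise with A's three category sets
theorem lookup_hate (w : String) :
    PySem.Dict.get? word_category w = some "hate_speech" ↔ w ∈ (["hate", "toxic", "stupid", "idiot", "moron", "dumb"] : List String) := by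
  rw [PySem.Dict.get?_eq_some_iff_mem_items word_category w "hate_speech" (by decide)]
  have hitems : word_category.items =
      [("hate", "hate_speech"), ("toxic", "hate_speech"), ("stupid", "hate_speech"),
       ("idiot", "hate_speech"), ("moron", "hate_speech"), ("dumb", "hate_speech"),
       ("spam", "spam"), ("scam", "spam"), ("fraud", "spam"), ("fake", "spam"),
       ("bot", "spam"), ("shill", "spam"),
       ("kill", "threats"), ("die", "threats"), ("death", "threats"),
       ("suicide", "threats"), ("harm", "threats")] := by decide
  rw [hitems]
  simp [Prod.ext_iff]

theorem lookup_spam (w : String) :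
    PySem.Dict.get? word_category w = some "spam" ↔ w ∈ (["spam", "scam", "fraud", "fake", "bot", "shill"] : List String) := by
  rw [PySem.Dict.get?_eq_some_iff_mem_items word_category w "spam" (by decide)]
  have hitems : word_category.items =
      [("hate", "hate_speech"), ("toxic", "hate_speech"), ("stupid", "hate_speech"),
       ("idiot", "hate_speech"), ("moron", "hate_speech"), ("dumb", "hate_speech"),
       ("spam", "spam"), ("scam", "spam"), ("fraud", "spam"), ("fake", "spam"),
       ("bot", "spam"), ("shill", "spam"),
       ("kill", "threats"), ("die", "threats"), ("death", "threats"),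
       ("suicide", "threats"), ("harm", "threats")] := by decide
  rw [hitems]
  simp [Prod.ext_iff]

theorem lookup_threats (w : String) :
    PySem.Dict.get? word_category w = some "threats" ↔ w ∈ (["kill", "die", "death", "suicide", "harm"] : List String) := by
  rw [PySem.Dict.get?_eq_some_iff_mem_items word_category w "threats" (by decide)]
  have hitems : word_category.items =
      [("hate", "hate_speech"), ("toxic", "hate_speech"), ("stupid", "hate_speech"),
       ("idiot", "hate_speech"), ("moron", "hate_speech"), ("dumb", "hate_speech"),
       ("spam", "spam"), ("scam", "spam"), ("fraud", "spam"), ("fake", "spam"),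
       ("bot", "spam"), ("shill", "spam"),
       ("kill", "threats"), ("die", "threats"), ("death", "threats"),
       ("suicide", "threats"), ("harm", "threats")] := by decide
  rw [hitems]
  simp [Prod.ext_iff]

-- ===== VERDICT (by name: the statement is the Claim_ definition above) =====
theorem categorize_toxicity_spec : Claim_equal_categorize_toxicity := by
  intro ws _
  show categorize_toxicity ws = categorize_toxicity_alt ws
  unfold categorize_toxicity categorize_toxicity_alt
  simp only [List.filter_cons, List.filter_nil,
    found_eq ws "hate_speech" _ lookup_hate,
    found_eq ws "spam" _ lookup_spam,
    found_eq ws "threats" _ lookup_threats]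
  split_ifs <;> simp_all
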